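-- pv_equiv track=rewrite | github.com/artbohr/Codewars-Algorithms-Python- | 7-kyu/alternate-square-sum.py | alternate_sq_sum
-- ===== SOURCE A (Python) =====
-- def alternate_sq_sum(arr):
--     output = 0
--
--     for i, num in enumerate(arr):
--         if (i+1)%2==0:
--             output += num**2
--         else:
--             output += num
--
--     return output
-- ===== SOURCE B (Python) =====
-- def alternate_sq_sum(arr):
--     it = iter(arr)
--     total = 0
--     for x in it:
--         total += x
--         y = next(it, None)
--         if y is None:
--             break
--         total += y * y
--     return total
-- ===== Notes on version B (the rewrite author's own statement) =====
-- stated objective: alternative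
-- what changed: Replaces the enumerate loop with a per-element parity branch by a loop that pairs elements two at a time from a single iterator (plain value + square), removing indices and the modulo test entirely.
import Mathlib
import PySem

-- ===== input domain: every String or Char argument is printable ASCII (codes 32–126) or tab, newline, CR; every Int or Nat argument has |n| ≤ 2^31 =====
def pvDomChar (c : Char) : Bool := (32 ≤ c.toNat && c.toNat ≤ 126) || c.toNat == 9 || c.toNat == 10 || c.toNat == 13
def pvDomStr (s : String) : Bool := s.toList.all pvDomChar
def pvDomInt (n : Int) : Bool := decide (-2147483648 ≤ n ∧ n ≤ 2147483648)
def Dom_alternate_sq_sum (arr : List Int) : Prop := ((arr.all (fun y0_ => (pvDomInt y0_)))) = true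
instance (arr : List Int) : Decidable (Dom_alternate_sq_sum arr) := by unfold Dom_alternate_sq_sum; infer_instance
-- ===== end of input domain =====

-- B replaces A's enumerate loop with parity branch by a two-at-a-time pairing loop (value + square), no indices or modulo.


-- ===== PORT A =====
-- for i, num in enumerate(arr): output += num**2 if (i+1)%2==0 else num
def alternate_sq_sum (arr : List Int) : Int :=
  (PySem.List.enumerate arr 0).foldl
    (fun output p =>
      if PySem.Int.mod (p.1 + 1) 2 == 0 then output + p.2 ^ 2 else output + p.2)
    0

-- ===== PORT B =====
-- the pairing loop: take x, then try to take y; accumulate x (+ y*y)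
def altGo (total : Int) : List Int → Int
  | [] => total
  | [x] => total + x
  | x :: y :: rest => altGo (total + x + y * y) rest

def alternate_sq_sum_alt (arr : List Int) : Int := altGo 0 arr

-- ===== PRECONDITION & SPEC =====
def Spec_alternate_sq_sum (arr : List Int) (out : Int) : Prop := out = alternate_sq_sum_alt arr
instance (arr : List Int) (out : Int) : Decidable (Spec_alternate_sq_sum arr out) := by unfold Spec_alternate_sq_sum; infer_instance

-- ===== CLAIM (what is proved, stated in full; the proofs are below) =====
def Claim_equal_alternate_sq_sum : Prop := ∀ (arr : List Int), Dom_alternate_sq_sum arr → Spec_alternate_sq_sum arr (alternate_sq_sum arr)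

-- ===== LEMMAS AND PROOFS =====

theorem mod_odd (k : Nat) : PySem.Int.mod ((2 * k + 1 : Nat) : Int) 2 = 1 := by
  have := PySem.Int.mod_natCast (2 * k + 1) 2
  simp at this ⊢

theorem foldA_eq_altGo : ∀ (arr : List Int) (k : Nat) (acc : Int),
    (PySem.List.enumerate arr ((2 * k : Nat) : Int)).foldl
      (fun output p =>
        if PySem.Int.mod (p.1 + 1) 2 == 0 then output + p.2 ^ 2 else output + p.2)
      acc = altGo acc arr
  | [], k, acc => by simp [altGo]
  | [x], k, acc => by
      have h : ((2 * k : Nat) : Int) + 1 = ((2 * k + 1 : Nat) : Int) := by push_cast; ring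
      simp [PySem.List.enumerate_cons, PySem.List.enumerate_nil, altGo, h, mod_odd]
  | x :: y :: rest, k, acc => by
      have h1 : ((2 * k : Nat) : Int) + 1 = ((2 * k + 1 : Nat) : Int) := by push_cast; ring
      have h2 : ((2 * k + 1 : Nat) : Int) + 1 = ((2 * (k + 1) : Nat) : Int) := by push_cast; ring
      rw [PySem.List.enumerate_cons, List.foldl_cons, PySem.List.enumerate_cons, List.foldl_cons,
        h1, h2, foldA_eq_altGo rest (k + 1)]
      simp [altGo, h1]
      ring_nf

-- ===== VERDICT (by name: the statement is the Claim_ definition above) =====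
theorem alternate_sq_sum_spec : Claim_equal_alternate_sq_sum := by
  intro arr _
  unfold Spec_alternate_sq_sum alternate_sq_sum alternate_sq_sum_alt
  have := foldA_eq_altGo arr 0 0
  simpa using this
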